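-- pv_equiv track=rewrite | github.com/yuyaxiong/interveiw_algorithm | LeetCode/438.py | cmp_dict
-- ===== SOURCE A (Python) =====
-- def cmp_dict(p1_dict, p2_dict):
--     for k, v in p1_dict.items():
--         if v == 0:
--             continue
--         if p2_dict.get(k) != v:
--             return False
--     for k, v in p2_dict.items():
--         if v == 0:
--             continue
--         if p1_dict.get(k) != v:
--             return False
--     return True
-- ===== SOURCE B (Python) =====
-- def cmp_dict(p1_dict, p2_dict):
--     return ({k: v for k, v in p1_dict.items() if v != 0}
--             == {k: v for k, v in p2_dict.items() if v != 0})
-- ===== Notes on version B (the rewrite author's own statement) =====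
-- stated objective: simpler
-- what changed: Replaces the two directional scan-and-probe loops by normalizing both dicts (dropping zero-valued entries) and comparing the normalized dicts with a single ==.
import Mathlib
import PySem

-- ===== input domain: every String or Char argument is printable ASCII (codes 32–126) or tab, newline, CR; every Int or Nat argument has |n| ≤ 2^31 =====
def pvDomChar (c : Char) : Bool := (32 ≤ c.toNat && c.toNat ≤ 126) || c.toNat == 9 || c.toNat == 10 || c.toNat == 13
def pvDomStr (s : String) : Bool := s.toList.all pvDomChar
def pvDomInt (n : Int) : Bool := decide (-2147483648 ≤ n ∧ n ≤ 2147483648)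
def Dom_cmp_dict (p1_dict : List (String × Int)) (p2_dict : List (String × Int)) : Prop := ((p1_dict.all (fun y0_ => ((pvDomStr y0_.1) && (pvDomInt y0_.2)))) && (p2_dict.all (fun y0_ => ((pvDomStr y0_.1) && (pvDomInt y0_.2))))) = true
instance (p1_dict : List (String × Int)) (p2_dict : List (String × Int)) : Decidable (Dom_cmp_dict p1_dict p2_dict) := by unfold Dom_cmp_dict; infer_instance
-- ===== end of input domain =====

-- B normalizes both dicts (dropping zero-valued entries) and compares them with one dict ==,
-- instead of A's two directional scan-and-probe loops; objective: simpler.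

-- ===== PORT A =====
-- 'for k, v in d.items(): if v == 0: continue; if other.get(k) != v: return False'
def cmpLoopA : List (String × Int) → PySem.Dict String Int → Bool
  | [], _ => true
  | (k, v) :: rest, other =>
    if v == 0 then cmpLoopA rest other
    else if other.get? k != some v then false
    else cmpLoopA rest other

def cmp_dict (p1_dict : List (String × Int)) (p2_dict : List (String × Int)) : Bool :=
  let d1 := PySem.Dict.ofList p1_dict
  let d2 := PySem.Dict.ofList p2_dict
  cmpLoopA d1.items d2 && cmpLoopA d2.items d1

-- ===== PORT B =====
-- Python dict == ignores insertion order: equal sizes and every item of the left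
-- found by key lookup in the right (exact for dicts, whose keys are unique).
def pyDictEq (l r : List (String × Int)) : Bool :=
  l.length == r.length && l.all (fun p => (PySem.Dict.mk r).get? p.1 == some p.2)

def cmp_dict_alt (p1_dict : List (String × Int)) (p2_dict : List (String × Int)) : Bool :=
  pyDictEq ((PySem.Dict.ofList p1_dict).items.filter (fun p => p.2 != 0))
           ((PySem.Dict.ofList p2_dict).items.filter (fun p => p.2 != 0))

-- ===== PRECONDITION & SPEC =====
def Spec_cmp_dict (p1_dict : List (String × Int)) (p2_dict : List (String × Int)) (out : Bool) : Prop := out = cmp_dict_alt p1_dict p2_dict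
instance (p1_dict : List (String × Int)) (p2_dict : List (String × Int)) (out : Bool) : Decidable (Spec_cmp_dict p1_dict p2_dict out) := by unfold Spec_cmp_dict; infer_instance

-- ===== CLAIM (what is proved, stated in full; the proofs are below) =====
def Claim_equal_cmp_dict : Prop := ∀ (p1_dict : List (String × Int)) (p2_dict : List (String × Int)), Dom_cmp_dict p1_dict p2_dict → Spec_cmp_dict p1_dict p2_dict (cmp_dict p1_dict p2_dict)

-- ===== LEMMAS AND PROOFS =====

theorem cmpLoopA_iff (l : List (String × Int)) (d : PySem.Dict String Int) :
    cmpLoopA l d = true ↔ ∀ p ∈ l, p.2 ≠ 0 → d.get? p.1 = some p.2 := by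
  induction l with
  | nil => simp [cmpLoopA]
  | cons p rest ih =>
    obtain ⟨k, v⟩ := p
    simp only [cmpLoopA]
    by_cases hv : v = 0
    · simp [hv, ih]
    · by_cases hg : d.get? k = some v
      · simp [hv, hg, ih]
      · simp [hv, hg]

theorem items_keys_nodup (l : List (String × Int)) :
    ((PySem.Dict.ofList l).items.map Prod.fst).Nodup := by
  have h := PySem.Dict.nodup_keys_ofList (ps := l)
  simpa [PySem.Dict.keys] using h

theorem filter_keys_nodup {l : List (String × Int)} {f : String × Int → Bool}
    (h : (l.map Prod.fst).Nodup) : ((l.filter f).map Prod.fst).Nodup :=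
  ((List.filter_sublist (l := l)).map Prod.fst).nodup h

theorem cmp_dict_eq_alt (p1_dict p2_dict : List (String × Int)) :
    cmp_dict p1_dict p2_dict = cmp_dict_alt p1_dict p2_dict := by
  rw [Bool.eq_iff_iff]
  unfold cmp_dict cmp_dict_alt pyDictEq
  set d1 := PySem.Dict.ofList p1_dict with hd1
  set d2 := PySem.Dict.ofList p2_dict with hd2
  set f1 := d1.items.filter (fun p => p.2 != 0) with hf1def
  set f2 := d2.items.filter (fun p => p.2 != 0) with hf2def
  have hk1 : (d1.items.map Prod.fst).Nodup := items_keys_nodup p1_dict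
  have hk2 : (d2.items.map Prod.fst).Nodup := items_keys_nodup p2_dict
  have hfk1 : (f1.map Prod.fst).Nodup := filter_keys_nodup hk1
  have hfk2 : (f2.map Prod.fst).Nodup := filter_keys_nodup hk2
  have hf1n : f1.Nodup := hfk1.of_map _
  have hf2n : f2.Nodup := hfk2.of_map _
  have hmem1 : ∀ p : String × Int, p ∈ f1 ↔ p ∈ d1.items ∧ p.2 ≠ 0 := by
    intro p; simp [hf1def, List.mem_filter]
  have hmem2 : ∀ p : String × Int, p ∈ f2 ↔ p ∈ d2.items ∧ p.2 ≠ 0 := by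
    intro p; simp [hf2def, List.mem_filter]
  have hmkkeys : ((PySem.Dict.mk f2).keys).Nodup := by
    simpa [PySem.Dict.keys] using hfk2
  simp only [Bool.and_eq_true, List.all_eq_true, beq_iff_eq, cmpLoopA_iff]
  constructor
  · rintro ⟨h12, h21⟩
    have sub12 : f1 ⊆ f2 := by
      intro p hp
      rcases (hmem1 p).mp hp with ⟨hm, hv⟩
      have hg := h12 p hm hv
      have : (p.1, p.2) ∈ d2.items := PySem.Dict.mem_items_of_get?_eq_some d2 hg
      exact (hmem2 p).mpr ⟨by simpa using this, hv⟩
    have sub21 : f2 ⊆ f1 := by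
      intro p hp
      rcases (hmem2 p).mp hp with ⟨hm, hv⟩
      have hg := h21 p hm hv
      have : (p.1, p.2) ∈ d1.items := PySem.Dict.mem_items_of_get?_eq_some d1 hg
      exact (hmem1 p).mpr ⟨by simpa using this, hv⟩
    have hperm : f1.Perm f2 :=
      (List.perm_ext_iff_of_nodup hf1n hf2n).mpr (fun a => ⟨fun h => sub12 h, fun h => sub21 h⟩)
    refine ⟨hperm.length_eq, ?_⟩
    intro p hp
    have hp2 : p ∈ f2 := sub12 hp
    have : ((p.1, p.2) : String × Int) ∈ (PySem.Dict.mk f2).items := by simpa using hp2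
    exact PySem.Dict.get?_of_mem_items _ this hmkkeys
  · rintro ⟨hlen, hall⟩
    have sub12 : f1 ⊆ f2 := by
      intro p hp
      have hg := hall p hp
      have : (p.1, p.2) ∈ (PySem.Dict.mk f2).items :=
        PySem.Dict.mem_items_of_get?_eq_some _ hg
      simpa using this
    have hperm : f1.Perm f2 :=
      (hf1n.subperm sub12).perm_of_length_le (le_of_eq hlen.symm)
    have sub21 : f2 ⊆ f1 := fun a ha => hperm.mem_iff.mpr ha
    constructor
    · intro p hm hv
      have hp1 : p ∈ f1 := (hmem1 p).mpr ⟨hm, hv⟩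
      have hg := hall p hp1
      have hpf2 : p ∈ f2 := sub12 hp1
      have hmem : (p.1, p.2) ∈ d2.items := by
        rcases (hmem2 p).mp hpf2 with ⟨hm2, _⟩
        simpa using hm2
      exact PySem.Dict.get?_of_mem_items d2 hmem (by simpa [PySem.Dict.keys] using hk2)
    · intro p hm hv
      have hp2 : p ∈ f2 := (hmem2 p).mpr ⟨hm, hv⟩
      have hp1 : p ∈ f1 := sub21 hp2
      have hmem : (p.1, p.2) ∈ d1.items := by
        rcases (hmem1 p).mp hp1 with ⟨hm1, _⟩
        simpa using hm1
      exact PySem.Dict.get?_of_mem_items d1 hmem (by simpa [PySem.Dict.keys] using hk1)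

-- ===== VERDICT (by name: the statement is the Claim_ definition above) =====
theorem cmp_dict_spec : Claim_equal_cmp_dict := by
  intro p1 p2 _
  exact cmp_dict_eq_alt p1 p2
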